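-- pv_equiv track=rewrite | github.com/leowerneck/Tabulated_EOS_IllinoisGRMHD | nrpy_core/optical_depth_helpers.py | average_opacities
-- ===== SOURCE A (Python) =====
-- def index_shift(i=None,c="",s="1"):
--     """
--     Returns a string that describes the gridpoint
--     index, allowing for shifts.
--
--     Expected output:
--
--     index_shift():
--     "i0_i1_i2"
--
--     index_shift(0,"p"):
--     "i0p1_i1_i2"
--
--     index_shift(2,"m","half"):
--     "i0_i1_i2mhalf"
--     """
--     if c == "":
--         return "i0_i1_i2"
--     else:
--         if i == 0:
--             return "i0"+c+s+"_i1_i2"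
--         elif i == 1:
--             return "i0_i1"+c+s+"_i2"
--         else:
--             return "i0_i1_i2"+c+s
--
-- def average_gf(gf,i,c):
--     """
--     Returns a string that computes the average of
--     a given gridfunction. Example outputs:
--
--     average_gf("<gf>",0,"p")
--     'const REAL <gf>_i0phalf_i1_i2 = 0.5*(<gf>_i0_i1_i2 + <gf>_i0p1_i1_i2);\n'
--
--     average_gf("<gf>",2,"m")
--     'const REAL <gf>_i0_i1_i2mhalf = 0.5*(<gf>_i0_i1_i2 + <gf>_i0_i1_i2m1);\n'
--     """
--     return "const REAL "+gf+"_"+index_shift(i,c,"half")+" = 0.5*("+gf+"_"+index_shift(i)+" + "+gf+"_"+index_shift(i,c)+");\n"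
--
-- def average_opacities(indent = "  "):
--     """
--     Returns a string that computes the average opacity.
--
--     Expected output of average_opacities() is n copies of the following
--     lines:
--
--     const REAL <gf>_i0phalf_i1_i2 = 0.5*(<gf>_i0_i1_i2 + <gf>_i0p1_i1_i2);
--     const REAL <gf>_i0mhalf_i1_i2 = 0.5*(<gf>_i0_i1_i2 + <gf>_i0m1_i1_i2);
--     const REAL <gf>_i0_i1phalf_i2 = 0.5*(<gf>_i0_i1_i2 + <gf>_i0_i1p1_i2);
--     const REAL <gf>_i0_i1mhalf_i2 = 0.5*(<gf>_i0_i1_i2 + <gf>_i0_i1m1_i2);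
--     const REAL <gf>_i0_i1_i2phalf = 0.5*(<gf>_i0_i1_i2 + <gf>_i0_i1_i2p1);
--     const REAL <gf>_i0_i1_i2mhalf = 0.5*(<gf>_i0_i1_i2 + <gf>_i0_i1_i2m1);
--
--     where <gf> is replaced by each of the n gridfunctions in
--     the gfs list defined below.
--     """
--     string = ""
--     gfs = ["kappa_0_nue","kappa_1_nue","kappa_0_anue","kappa_1_anue","kappa_0_nux","kappa_1_nux"]
--     for gf in gfs:
--         for i in range(3):
--             string += indent+average_gf(gf,i,"p")
--             string += indent+average_gf(gf,i,"m")
--         string += "\n"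
--     return string
-- ===== SOURCE B (Python) =====
-- # One literal six-line template per gridfunction (f-string), one pass over the gfs list;
-- # no index_shift/average_gf machinery and no inner loop over axes.
--
-- def _block(gf, indent):
--     return (
--         f"{indent}const REAL {gf}_i0phalf_i1_i2 = 0.5*({gf}_i0_i1_i2 + {gf}_i0p1_i1_i2);\n"
--         f"{indent}const REAL {gf}_i0mhalf_i1_i2 = 0.5*({gf}_i0_i1_i2 + {gf}_i0m1_i1_i2);\n"
--         f"{indent}const REAL {gf}_i0_i1phalf_i2 = 0.5*({gf}_i0_i1_i2 + {gf}_i0_i1p1_i2);\n"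
--         f"{indent}const REAL {gf}_i0_i1mhalf_i2 = 0.5*({gf}_i0_i1_i2 + {gf}_i0_i1m1_i2);\n"
--         f"{indent}const REAL {gf}_i0_i1_i2phalf = 0.5*({gf}_i0_i1_i2 + {gf}_i0_i1_i2p1);\n"
--         f"{indent}const REAL {gf}_i0_i1_i2mhalf = 0.5*({gf}_i0_i1_i2 + {gf}_i0_i1_i2m1);\n"
--         "\n")
--
-- def average_opacities(indent = "  "):
--     gfs = ["kappa_0_nue","kappa_1_nue","kappa_0_anue","kappa_1_anue","kappa_0_nux","kappa_1_nux"]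
--     return "".join(_block(gf, indent) for gf in gfs)
-- ===== Notes on version B (the rewrite author's own statement) =====
-- stated objective: simpler
-- what changed: Replaced the inner loop over axes/directions and the index_shift/average_gf string-assembly helpers by one literal six-line per-gridfunction template, substituted once per gridfunction and joined.
import Mathlib
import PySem

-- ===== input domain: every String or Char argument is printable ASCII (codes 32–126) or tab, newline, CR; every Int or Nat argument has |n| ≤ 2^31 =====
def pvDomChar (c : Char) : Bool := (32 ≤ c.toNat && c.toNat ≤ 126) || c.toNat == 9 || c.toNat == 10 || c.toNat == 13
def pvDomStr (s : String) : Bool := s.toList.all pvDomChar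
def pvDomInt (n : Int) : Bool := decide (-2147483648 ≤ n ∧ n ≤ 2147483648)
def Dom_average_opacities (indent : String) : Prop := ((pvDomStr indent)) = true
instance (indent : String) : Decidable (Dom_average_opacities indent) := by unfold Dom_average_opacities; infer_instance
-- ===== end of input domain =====

-- B replaces A's inner axis/direction loop and index-string helpers with one literal
-- six-line template per gridfunction, joined over the fixed gf list (objective: simpler).

-- ===== PORT A =====
def index_shift (i : Option Int) (c : String) (s : String) : String :=
  if c = "" then "i0_i1_i2"
  else
    if i = some 0 then "i0" ++ c ++ s ++ "_i1_i2"
    else if i = some 1 then "i0_i1" ++ c ++ s ++ "_i2"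
    else "i0_i1_i2" ++ c ++ s

def average_gf (gf : String) (i : Option Int) (c : String) : String :=
  "const REAL " ++ gf ++ "_" ++ index_shift i c "half" ++ " = 0.5*(" ++ gf ++ "_" ++
    index_shift none "" "1" ++ " + " ++ gf ++ "_" ++ index_shift i c "1" ++ ");\n"

def average_opacities (indent : String) : String :=
  let gfs := ["kappa_0_nue","kappa_1_nue","kappa_0_anue","kappa_1_anue","kappa_0_nux","kappa_1_nux"]
  gfs.foldl (fun string gf =>
    ((PySem.List.pyRange 0 3 1).foldl (fun s i =>
      (s ++ (indent ++ average_gf gf (some i) "p")) ++ (indent ++ average_gf gf (some i) "m"))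
      string) ++ "\n") ""

-- ===== PORT B =====
def pvBlock (gf : String) (indent : String) : String :=
  indent ++ "const REAL " ++ gf ++ "_i0phalf_i1_i2 = 0.5*(" ++ gf ++ "_i0_i1_i2 + " ++ gf ++ "_i0p1_i1_i2);\n" ++
  (indent ++ "const REAL " ++ gf ++ "_i0mhalf_i1_i2 = 0.5*(" ++ gf ++ "_i0_i1_i2 + " ++ gf ++ "_i0m1_i1_i2);\n" ++
  (indent ++ "const REAL " ++ gf ++ "_i0_i1phalf_i2 = 0.5*(" ++ gf ++ "_i0_i1_i2 + " ++ gf ++ "_i0_i1p1_i2);\n" ++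
  (indent ++ "const REAL " ++ gf ++ "_i0_i1mhalf_i2 = 0.5*(" ++ gf ++ "_i0_i1_i2 + " ++ gf ++ "_i0_i1m1_i2);\n" ++
  (indent ++ "const REAL " ++ gf ++ "_i0_i1_i2phalf = 0.5*(" ++ gf ++ "_i0_i1_i2 + " ++ gf ++ "_i0_i1_i2p1);\n" ++
  (indent ++ "const REAL " ++ gf ++ "_i0_i1_i2mhalf = 0.5*(" ++ gf ++ "_i0_i1_i2 + " ++ gf ++ "_i0_i1_i2m1);\n" ++
  "\n")))))

def average_opacities_alt (indent : String) : String :=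
  PySem.Str.join ""
    ((["kappa_0_nue","kappa_1_nue","kappa_0_anue","kappa_1_anue","kappa_0_nux","kappa_1_nux"]).map
      (fun gf => pvBlock gf indent))

-- ===== PRECONDITION & SPEC =====
def Spec_average_opacities (indent : String) (out : String) : Prop := out = average_opacities_alt indent
instance (indent : String) (out : String) : Decidable (Spec_average_opacities indent out) := by unfold Spec_average_opacities; infer_instance

-- ===== CLAIM (what is proved, stated in full; the proofs are below) =====
def Claim_equal_average_opacities : Prop := ∀ (indent : String), Dom_average_opacities indent → Spec_average_opacities indent (average_opacities indent)

-- ===== LEMMAS AND PROOFS =====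
theorem pv_join_nil : PySem.Str.join "" ([] : List String) = "" := by
  rw [← String.toList_inj]; simp [pysem]

theorem pv_join_cons (x : String) (xs : List String) :
    PySem.Str.join "" (x :: xs) = x ++ PySem.Str.join "" xs := by
  rw [← String.toList_inj]
  simp only [PySem.Str.toList_join, String.toList_append]
  cases xs <;> simp [PySem.Chars.join, List.intercalate]

theorem pv_line_0p (gf : String) : average_gf gf (some 0) "p" =
    "const REAL " ++ gf ++ "_i0phalf_i1_i2 = 0.5*(" ++ gf ++ "_i0_i1_i2 + " ++ gf ++ "_i0p1_i1_i2);\n" := by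
  simp [average_gf, index_shift, String.append_assoc]

theorem pv_line_0m (gf : String) : average_gf gf (some 0) "m" =
    "const REAL " ++ gf ++ "_i0mhalf_i1_i2 = 0.5*(" ++ gf ++ "_i0_i1_i2 + " ++ gf ++ "_i0m1_i1_i2);\n" := by
  simp [average_gf, index_shift, String.append_assoc]

theorem pv_line_1p (gf : String) : average_gf gf (some 1) "p" =
    "const REAL " ++ gf ++ "_i0_i1phalf_i2 = 0.5*(" ++ gf ++ "_i0_i1_i2 + " ++ gf ++ "_i0_i1p1_i2);\n" := by
  simp [average_gf, index_shift, String.append_assoc]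

theorem pv_line_1m (gf : String) : average_gf gf (some 1) "m" =
    "const REAL " ++ gf ++ "_i0_i1mhalf_i2 = 0.5*(" ++ gf ++ "_i0_i1_i2 + " ++ gf ++ "_i0_i1m1_i2);\n" := by
  simp [average_gf, index_shift, String.append_assoc]

theorem pv_line_2p (gf : String) : average_gf gf (some 2) "p" =
    "const REAL " ++ gf ++ "_i0_i1_i2phalf = 0.5*(" ++ gf ++ "_i0_i1_i2 + " ++ gf ++ "_i0_i1_i2p1);\n" := by
  simp [average_gf, index_shift, String.append_assoc]

theorem pv_line_2m (gf : String) : average_gf gf (some 2) "m" =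
    "const REAL " ++ gf ++ "_i0_i1_i2mhalf = 0.5*(" ++ gf ++ "_i0_i1_i2 + " ++ gf ++ "_i0_i1_i2m1);\n" := by
  simp [average_gf, index_shift, String.append_assoc]

theorem pv_block_eq (gf indent s : String) :
    ((PySem.List.pyRange 0 3 1).foldl (fun acc i =>
      (acc ++ (indent ++ average_gf gf (some i) "p")) ++ (indent ++ average_gf gf (some i) "m")) s) ++ "\n"
    = s ++ pvBlock gf indent := by
  have hr : PySem.List.pyRange 0 3 1 = [0, 1, 2] := by rfl
  rw [hr]
  simp only [List.foldl, pv_line_0p, pv_line_0m, pv_line_1p, pv_line_1m, pv_line_2p, pv_line_2m]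
  simp [pvBlock, String.append_assoc]

-- ===== VERDICT (by name: the statement is the Claim_ definition above) =====
set_option maxHeartbeats 1000000 in
theorem average_opacities_spec : Claim_equal_average_opacities := by
  intro indent _
  unfold Spec_average_opacities average_opacities average_opacities_alt
  simp only [List.foldl, List.map, pv_block_eq, pv_join_cons, pv_join_nil]
  simp [String.append_assoc]
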